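-- pv_equiv track=rewrite | github.com/aneeshKM/Hackerrank-Solutions | ProblemSolving-Algorithm/Python3/Equilize array.py | result
-- ===== SOURCE A (Python) =====
-- def result(n,a):
--     d = {}
--     for i in a:
--         try:
--             d[i] += 1
--         except:
--             d[i] = 1
--     b = max(list(d.values()))
--     if  b == 1:
--         return n-1
--     else:
--         return n - b
-- ===== SOURCE B (Python) =====
-- def result(n, a):
--     # sort a copy, then scan once for the longest run of equal elements
--     s = sorted(a)
--     best = 0
--     cur = 0
--     prev = None
--     for x in s:
--         cur = cur + 1 if prev == x else 1
--         best = max(best, cur)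
--         prev = x
--     return n - best
-- ===== Notes on version B (the rewrite author's own statement) =====
-- stated objective: alternative
-- what changed: replaces the hash-map frequency counter (dict built with try/except, then max over its values) by sort-then-scan: sort a copy of the list and track the longest run of equal adjacent elements in one pass
import Mathlib
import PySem

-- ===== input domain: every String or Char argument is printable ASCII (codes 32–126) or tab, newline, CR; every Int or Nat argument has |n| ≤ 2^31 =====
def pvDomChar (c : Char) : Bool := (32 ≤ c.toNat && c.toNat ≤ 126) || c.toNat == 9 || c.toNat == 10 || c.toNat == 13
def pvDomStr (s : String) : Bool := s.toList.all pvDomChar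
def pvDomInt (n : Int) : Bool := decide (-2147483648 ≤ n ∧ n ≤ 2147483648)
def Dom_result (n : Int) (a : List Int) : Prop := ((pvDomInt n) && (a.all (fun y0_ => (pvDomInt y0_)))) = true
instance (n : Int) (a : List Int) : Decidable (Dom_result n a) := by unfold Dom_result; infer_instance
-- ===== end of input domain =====

-- B replaces A's dict frequency counter by sort-then-scan (longest run of equal
-- adjacent elements in a sorted copy); same return value wherever A returns.

-- ===== PORT A =====
-- d = {}; for i in a: try d[i] += 1 except: d[i] = 1  — then max(d.values())
def result (n : Int) (a : List Int) : Int :=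
  let d := a.foldl (fun d i => d.insert i (d.getD i 0 + 1)) PySem.Dict.empty
  let b := (PySem.List.max? d.values (fun x => x)).getD 0   -- none only when a = [], excluded by Pre_
  if b = 1 then n - 1 else n - b

-- ===== PORT B =====
-- the scan over sorted(a): state (best, cur, prev)
def runMaxB : List Int → Int → Int → Option Int → Int
  | [], best, _, _ => best
  | x :: xs, best, cur, prev =>
      let cur' := if prev = some x then cur + 1 else 1
      runMaxB xs (max best cur') cur' (some x)

def result_alt (n : Int) (a : List Int) : Int :=
  n - runMaxB (PySem.List.sorted a (fun x => x) false) 0 0 none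

-- ===== PRECONDITION & SPEC =====
-- Pre_ excludes only a = [], where A's max([]) raises ValueError.
def Pre_result (n : Int) (a : List Int) : Prop := a ≠ []
instance (n : Int) (a : List Int) : Decidable (Pre_result n a) := by unfold Pre_result; infer_instance
def pvWitness_result : Int × List Int := (5, [1, 2, 2, 3])

def Spec_result (n : Int) (a : List Int) (out : Int) : Prop := out = result_alt n a
instance (n : Int) (a : List Int) (out : Int) : Decidable (Spec_result n a out) := by unfold Spec_result; infer_instance

-- ===== CLAIM (what is proved, stated in full; the proofs are below) =====
def Claim_equal_result : Prop := ∀ (n : Int) (a : List Int), Dom_result n a → Pre_result n a → Spec_result n a (result n a)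

-- ===== LEMMAS AND PROOFS =====

-- max of {0} ∪ L, as a foldr
lemma le_foldr_max' (L : List Int) (x : Int) (h : x ∈ L) : x ≤ L.foldr max 0 := by
  induction L with
  | nil => simp at h
  | cons y t ih =>
      rcases List.mem_cons.mp h with rfl | h'
      · simp only [List.foldr]; omega
      · have := ih h'; simp only [List.foldr]; omega

lemma foldl_max_eq_foldr (L : List Int) : ∀ (a : Int), 0 ≤ a → L.foldl max a = max a (L.foldr max 0) := by
  induction L with
  | nil => intro a ha; simp; omega
  | cons x t ih =>
      intro a ha
      have h1 := ih (max a x) (by omega)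
      simp only [List.foldl, List.foldr] at *
      omega

-- Set.ofList distributes over cons when the head is fresh
lemma foldl_add_cons_not_mem (l : List Int) : ∀ (s : List Int) (x : Int), x ∉ l →
    l.foldl PySem.Set.add (x :: s) = x :: l.foldl PySem.Set.add s := by
  induction l with
  | nil => intro s x _; rfl
  | cons y t ih =>
      intro s x hx
      have hxy : ¬ (y = x) := fun h => hx (h ▸ List.mem_cons_self)
      have : PySem.Set.add (x :: s) y = x :: PySem.Set.add s y := by
        simp [PySem.Set.add, PySem.Set.contains, hxy]
        split_ifs <;> rfl
      simp only [List.foldl, this]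
      exact ih _ x (fun h => hx (List.mem_cons_of_mem _ h))

lemma ofList_cons_not_mem (x : Int) (l : List Int) (hx : x ∉ l) :
    PySem.Set.ofList (x :: l) = x :: PySem.Set.ofList l := by
  simp only [PySem.Set.ofList_eq_foldl, List.foldl]
  have h0 : PySem.Set.add ([] : List Int) x = [x] := rfl
  rw [h0]
  exact foldl_add_cons_not_mem l [] x hx

-- the loop invariant for B's scan over a sorted list
lemma runMaxB_invariant (s : List Int) (hs : List.Pairwise (· ≤ ·) s) :
    ∀ (best cur p : Int), 1 ≤ cur → cur ≤ best → (∀ x ∈ s, p ≤ x) →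
    runMaxB s best cur (some p) =
      max best (((PySem.Set.ofList (p :: s)).map
        (fun k => (if k = p then cur else 0) + (s.count k : Int))).foldr max 0) := by
  induction s with
  | nil =>
      intro best cur p h1 h2 _
      have : PySem.Set.ofList ([p]) = [p] := rfl
      simp [runMaxB, this]
      omega
  | cons x t ih =>
      intro best cur p h1 h2 hp
      have hxt : ∀ y ∈ t, x ≤ y := fun y hy => (List.pairwise_cons.mp hs).1 y hy
      have ht : List.Pairwise (· ≤ ·) t := (List.pairwise_cons.mp hs).2
      have hpx : p ≤ x := hp x List.mem_cons_self
      by_cases hxp : p = x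
      · subst hxp
        simp only [runMaxB, if_true]
        have hstep := ih ht (max best (cur + 1)) (cur + 1) p (by omega) (by omega)
          (fun y hy => le_trans hpx (hxt y hy))
        rw [hstep]
        have hset : PySem.Set.ofList (p :: p :: t) = PySem.Set.ofList (p :: t) := by
          simp [PySem.Set.ofList_eq_foldl, List.foldl, PySem.Set.add, PySem.Set.contains]
        have hfun : ((PySem.Set.ofList (p :: t)).map
              (fun k => (if k = p then cur + 1 else 0) + (t.count k : Int)))
            = ((PySem.Set.ofList (p :: p :: t)).map
              (fun k => (if k = p then cur else 0) + ((p :: t).count k : Int))) := by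
          rw [hset]
          apply List.map_congr_left
          intro k _
          by_cases hk : k = p <;> simp [hk, List.count_cons] <;> omega
        rw [hfun]
        set m := ((PySem.Set.ofList (p :: p :: t)).map
          (fun k => (if k = p then cur else 0) + ((p :: t).count k : Int))).foldr max 0 with hm
        have hmem : ((if p = p then cur else 0) + ((p :: t).count p : Int)) ∈
            ((PySem.Set.ofList (p :: p :: t)).map
              (fun k => (if k = p then cur else 0) + ((p :: t).count k : Int))) := by
          apply List.mem_map_of_mem
          rw [hset]
          exact (PySem.Set.mem_ofList _ _).mpr List.mem_cons_self
        have hle := le_foldr_max' _ _ hmem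
        rw [if_pos rfl, List.count_cons_self] at hle
        push_cast at hle
        rw [← hm] at hle
        omega
      · have hplt : p < x := lt_of_le_of_ne hpx hxp
        have hpnot : p ∉ x :: t := by
          intro hmem
          rcases List.mem_cons.mp hmem with rfl | h'
          · exact absurd rfl hxp
          · exact absurd (hxt p h') (by omega)
        have hne : ¬ (some p = some x) := by simp; exact hxp
        simp only [runMaxB, if_neg hne]
        have hstep := ih ht (max best 1) 1 x (by omega) (by omega) hxt
        rw [hstep]
        rw [ofList_cons_not_mem p (x :: t) hpnot]
        simp only [List.map_cons, List.foldr]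
        have hcount0 : ((x :: t).count p : Int) = 0 := by
          rw [List.count_eq_zero_of_not_mem hpnot]; rfl
        have hfun2 : ((PySem.Set.ofList (x :: t)).map
              (fun k => (if k = x then 1 else 0) + (t.count k : Int)))
            = ((PySem.Set.ofList (x :: t)).map
              (fun k => (if k = p then cur else 0) + ((x :: t).count k : Int))) := by
          apply List.map_congr_left
          intro k hk
          have hkmem : k ∈ x :: t := (PySem.Set.mem_ofList _ _).mp hk
          have hkp : ¬ (k = p) := by
            intro h; subst h; exact hpnot hkmem
          by_cases hkx : k = x <;> simp [hkx, hkp, List.count_cons] <;> omega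
        rw [hfun2]
        set m := ((PySem.Set.ofList (x :: t)).map
          (fun k => (if k = p then cur else 0) + ((x :: t).count k : Int))).foldr max 0 with hm
        have hmem : ((if x = p then cur else 0) + ((x :: t).count x : Int)) ∈
            ((PySem.Set.ofList (x :: t)).map
              (fun k => (if k = p then cur else 0) + ((x :: t).count k : Int))) := by
          apply List.mem_map_of_mem
          exact (PySem.Set.mem_ofList _ _).mpr List.mem_cons_self
        have hle := le_foldr_max' _ _ hmem
        rw [if_neg (fun h => hxp h.symm), List.count_cons_self] at hle
        push_cast at hle
        rw [← hm] at hle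
        simp only [if_true, hcount0]
        omega

lemma runMaxB_counts (s : List Int) (hs : List.Pairwise (· ≤ ·) s) :
    runMaxB s 0 0 none =
      ((PySem.Set.ofList s).map (fun k => (s.count k : Int))).foldr max 0 := by
  cases s with
  | nil => rfl
  | cons x t =>
      have hxt : ∀ y ∈ t, x ≤ y := fun y hy => (List.pairwise_cons.mp hs).1 y hy
      have ht : List.Pairwise (· ≤ ·) t := (List.pairwise_cons.mp hs).2
      have hnone : ¬ ((none : Option Int) = some x) := by simp
      simp only [runMaxB, if_neg hnone]
      have hstep := runMaxB_invariant t ht (max 0 1) 1 x (by omega) (by omega) hxt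
      rw [hstep]
      have hfun : ((PySem.Set.ofList (x :: t)).map
            (fun k => (if k = x then 1 else 0) + (t.count k : Int)))
          = ((PySem.Set.ofList (x :: t)).map (fun k => ((x :: t).count k : Int))) := by
        apply List.map_congr_left
        intro k _
        by_cases hkx : k = x <;> simp [hkx, List.count_cons] <;> omega
      rw [hfun]
      set m := ((PySem.Set.ofList (x :: t)).map (fun k => ((x :: t).count k : Int))).foldr max 0 with hm
      have hmem : (((x :: t).count x : Int)) ∈
          ((PySem.Set.ofList (x :: t)).map (fun k => ((x :: t).count k : Int))) :=
        List.mem_map_of_mem ((PySem.Set.mem_ofList _ _).mpr List.mem_cons_self)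
      have hle := le_foldr_max' _ _ hmem
      rw [List.count_cons_self] at hle
      push_cast at hle
      rw [← hm] at hle
      omega

-- A's dict of counts, as counts over the ordered set of distinct elements
lemma counter_values (a : List Int) :
    (PySem.Dict.counter a).values = (PySem.Set.ofList a).map (fun k => (a.count k : Int)) := by
  simp [PySem.Dict.values, PySem.Dict.items_counter, List.map_map, Function.comp]

lemma result_eq_counts (n : Int) (a : List Int) (h : a ≠ []) :
    result n a = n - ((PySem.Set.ofList a).map (fun k => (a.count k : Int))).foldr max 0 := by
  simp only [result]
  rw [PySem.Dict.foldl_insert_getD_add_one_eq_counter, counter_values]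
  have hne : (PySem.Set.ofList a).map (fun k => (a.count k : Int)) ≠ [] := by
    cases a with
    | nil => exact absurd rfl h
    | cons x t =>
        have : x ∈ PySem.Set.ofList (x :: t) := (PySem.Set.mem_ofList _ _).mpr List.mem_cons_self
        intro hcontra
        have := List.mem_map_of_mem (f := fun k => ((x :: t).count k : Int)) this
        rw [hcontra] at this
        simp at this
  obtain ⟨c0, rest, hL⟩ := List.exists_cons_of_ne_nil hne
  rw [hL]
  have hc0 : 0 ≤ c0 := by
    have : c0 ∈ (PySem.Set.ofList a).map (fun k => (a.count k : Int)) := by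
      rw [hL]; exact List.mem_cons_self
    obtain ⟨k, _, hk⟩ := List.mem_map.mp this
    omega
  rw [PySem.List.max?_id_cons]
  simp only [Option.getD_some]
  rw [foldl_max_eq_foldr rest c0 hc0]
  simp only [List.foldr]
  by_cases hb : max c0 (rest.foldr max 0) = 1
  · rw [if_pos hb, hb]
  · rw [if_neg hb]

lemma foldr_max_counts_perm (a : List Int) :
    ((PySem.Set.ofList (PySem.List.sorted a (fun x => x) false)).map
        (fun k => ((PySem.List.sorted a (fun x => x) false).count k : Int))).foldr max 0
      = ((PySem.Set.ofList a).map (fun k => (a.count k : Int))).foldr max 0 := by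
  have hperm : (PySem.List.sorted a (fun x => x) false).Perm a :=
    PySem.List.sorted_perm a (fun x => x) false
  have hfun : (fun k => ((PySem.List.sorted a (fun x => x) false).count k : Int))
      = (fun k => (a.count k : Int)) := by
    funext k
    rw [hperm.count_eq]
  rw [hfun]
  have hsetperm : (PySem.Set.ofList (PySem.List.sorted a (fun x => x) false)).Perm
      (PySem.Set.ofList a) := by
    rw [List.perm_ext_iff_of_nodup (PySem.Set.nodup_ofList _) (PySem.Set.nodup_ofList _)]
    intro k
    rw [PySem.Set.mem_ofList, PySem.Set.mem_ofList]
    exact ⟨fun hk => hperm.mem_iff.mp hk, fun hk => hperm.mem_iff.mpr hk⟩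
  exact List.Perm.foldr_eq (hsetperm.map _) 0

-- ===== VERDICT (by name: the statement is the Claim_ definition above) =====
theorem result_spec : Claim_equal_result := by
  intro n a _ hpre
  unfold Spec_result result_alt
  rw [result_eq_counts n a hpre]
  rw [runMaxB_counts _ (by simpa using PySem.List.sorted_pairwise a (fun x : Int => x))]
  rw [foldr_max_counts_perm]
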